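-- pv_equiv track=rewrite | github.com/EliahSand/Kode-Trening | Vjudge/Vjudge1/Srednji.py | count_subsequences_with_median_B
-- ===== SOURCE A (Python) =====
-- from collections import defaultdict
--
-- def count_subsequences_with_median_B(n, B, A):
--     # Find the position of B in the array
--     pos = A.index(B)
--
--     # Dictionary to count occurrences of different sums
--     balance_count = defaultdict(int)
--     balance_count[0] = 1  # Initialize with the balance 0
--
--     sum = 0
--
--     # Count subsequences on the right side of B
--     for i in range(pos + 1, n):
--         if A[i] > B:
--             sum += 1
--         else:
--             sum -= 1
--         balance_count[sum] += 1
--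
--     result = balance_count[0]
--     sum = 0
--
--     # Count subsequences on the left side of B
--     for i in range(pos - 1, -1, -1):
--         if A[i] > B:
--             sum += 1
--         else:
--             sum -= 1
--         result += balance_count[-sum]
--
--     return result
-- ===== SOURCE B (Python) =====
-- def count_subsequences_with_median_B(n, B, A):
--     # Brute force over all (left boundary, right boundary) prefix pairs around B,
--     # keeping running balances; no dictionary is maintained.
--     pos = A.index(B)
--     result = 0
--     lbal = 0
--     for l in range(pos, -1, -1):
--         if l != pos:
--             lbal += 1 if A[l] > B else -1
--         if lbal == 0:
--             result += 1  # right part empty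
--         rbal = lbal
--         for r in range(pos + 1, n):
--             rbal += 1 if A[r] > B else -1
--             if rbal == 0:
--                 result += 1
--     return result
-- ===== Notes on version B (the rewrite author's own statement) =====
-- stated objective: alternative
-- what changed: A makes one linear pass that hashes right-side prefix balances into a dictionary and then matches left balances against it; B keeps no dictionary at all and brute-forces every (left boundary, right boundary) pair with two nested loops over running balances, counting the pairs whose balance is zero.
import Mathlib
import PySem

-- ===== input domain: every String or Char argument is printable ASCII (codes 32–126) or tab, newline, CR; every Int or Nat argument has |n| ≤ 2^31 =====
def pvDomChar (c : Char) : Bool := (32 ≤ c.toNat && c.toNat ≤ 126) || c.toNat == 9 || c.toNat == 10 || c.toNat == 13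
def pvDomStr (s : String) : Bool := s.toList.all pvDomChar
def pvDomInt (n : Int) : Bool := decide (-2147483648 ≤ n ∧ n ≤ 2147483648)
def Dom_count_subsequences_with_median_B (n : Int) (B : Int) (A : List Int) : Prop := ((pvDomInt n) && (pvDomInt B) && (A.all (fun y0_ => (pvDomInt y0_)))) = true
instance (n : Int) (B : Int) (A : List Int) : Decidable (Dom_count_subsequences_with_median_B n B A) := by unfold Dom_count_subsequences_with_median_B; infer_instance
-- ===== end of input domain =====

-- B replaces A's balance dictionary and matching pass by a dictionary-free brute force over all
-- (left boundary, right boundary) pairs with running balances (objective: alternative, not faster).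

-- ===== PORT A =====
def count_subsequences_with_median_B (n : Int) (B : Int) (A : List Int) : Int :=
  let pos : Int := (((PySem.List.index? A B).getD 0 : Nat) : Int)   -- A.index(B); ValueError (B ∉ A) excluded by Pre_
  let bc0 : PySem.Dict Int Int := (PySem.Dict.empty).insert 0 1
  let st1 := (PySem.List.pyRange (pos + 1) n 1).foldl
      (fun (st : PySem.Dict Int Int × Int) i =>
        let s := st.2 + (if PySem.List.pyGetD A i 0 > B then 1 else -1)  -- A[i]; in range under Pre_
        (st.1.insert s (st.1.getD s 0 + 1), s))
      (bc0, 0)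
  let bc := st1.1
  let st2 := (PySem.List.pyRange (pos - 1) (-1) (-1)).foldl
      (fun (st : Int × Int) i =>
        let s := st.2 + (if PySem.List.pyGetD A i 0 > B then 1 else -1)
        (st.1 + bc.getD (-s) 0, s))
      (bc.getD 0 0, 0)
  st2.1

-- ===== PORT B =====
def count_subsequences_with_median_B_alt (n : Int) (B : Int) (A : List Int) : Int :=
  let pos : Int := (((PySem.List.index? A B).getD 0 : Nat) : Int)
  let st := (PySem.List.pyRange pos (-1) (-1)).foldl
      (fun (st : Int × Int) l =>
        let lbal := if l ≠ pos then st.2 + (if PySem.List.pyGetD A l 0 > B then 1 else -1) else st.2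
        let res1 := if lbal = 0 then st.1 + 1 else st.1
        let inner := (PySem.List.pyRange (pos + 1) n 1).foldl
            (fun (st2 : Int × Int) r =>
              let rbal := st2.2 + (if PySem.List.pyGetD A r 0 > B then 1 else -1)
              (if rbal = 0 then st2.1 + 1 else st2.1, rbal))
            (res1, lbal)
        (inner.1, lbal))
      (0, 0)
  st.1

-- ===== PRECONDITION & SPEC =====
-- A raises ValueError when B ∉ A and IndexError when B ∈ A but n > len(A); Pre_ is exactly where A returns.
def Pre_count_subsequences_with_median_B (n : Int) (B : Int) (A : List Int) : Prop :=
  B ∈ A ∧ n ≤ (A.length : Int)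
instance (n : Int) (B : Int) (A : List Int) : Decidable (Pre_count_subsequences_with_median_B n B A) := by unfold Pre_count_subsequences_with_median_B; infer_instance
def pvWitness_count_subsequences_with_median_B : Int × Int × List Int := (4, 2, [1, 2, 3, 1])
def Spec_count_subsequences_with_median_B (n : Int) (B : Int) (A : List Int) (out : Int) : Prop := out = count_subsequences_with_median_B_alt n B A
instance (n : Int) (B : Int) (A : List Int) (out : Int) : Decidable (Spec_count_subsequences_with_median_B n B A out) := by unfold Spec_count_subsequences_with_median_B; infer_instance

-- ===== CLAIM (what is proved, stated in full; the proofs are below) =====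
def Claim_equal_count_subsequences_with_median_B : Prop := ∀ (n : Int) (B : Int) (A : List Int), Dom_count_subsequences_with_median_B n B A → Pre_count_subsequences_with_median_B n B A → Spec_count_subsequences_with_median_B n B A (count_subsequences_with_median_B n B A)

-- ===== LEMMAS AND PROOFS =====

def pvPbal (B : Int) (s : Int) : List Int → List Int
  | [] => []
  | x :: xs =>
      let s' := s + (if x > B then 1 else -1)
      s' :: pvPbal B s' xs

lemma pvMapRight (A : List Int) (a b : Nat) (hb : b ≤ A.length) :
    (PySem.List.pyRange (a : Int) (b : Int) 1).map (fun i => PySem.List.pyGetD A i 0)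
      = (A.drop a).take (b - a) := by
  apply List.ext_getElem
  · simp [PySem.List.length_pyRange_one]; omega
  · intro k h1 h2
    simp only [List.getElem_map, PySem.List.getElem_pyRange_one]
    have hk : k < b - a := by
      simpa [PySem.List.length_pyRange_one] using h1
    have hcast : (a : Int) + (k : Nat) = ((a + k : Nat) : Int) := by push_cast; ring
    rw [hcast, PySem.List.pyGetD_natCast]
    rw [List.getElem_take, List.getElem_drop]
    rw [List.getD_eq_getElem _ _ (by omega)]

lemma pvMapLeft (A : List Int) (p : Nat) (hp : p ≤ A.length) :
    (PySem.List.pyRange ((p : Int) - 1) (-1) (-1)).map (fun i => PySem.List.pyGetD A i 0)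
      = (A.take p).reverse := by
  rw [PySem.List.pyRange_neg_one]
  rw [show ((p : Int) - 1 - (-1)).toNat = p by omega]
  rw [List.map_map]
  apply List.ext_getElem
  · simp; omega
  · intro k h1 h2
    have hk : k < p := by simpa using h1
    have hlen : (A.take p).length = p := by simp; omega
    simp only [List.getElem_map, List.getElem_range, Function.comp_apply, List.getElem_reverse,
      List.getElem_take, hlen]
    rw [show (p : Int) - 1 - (k : Nat) = ((p - 1 - k : Nat) : Int) by omega]
    rw [PySem.List.pyGetD_natCast]
    rw [List.getD_eq_getElem _ _ (by omega)]

lemma pvDictFold (B : Int) (L : List Int) (s0 : Int) (d0 : PySem.Dict Int Int) :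
    L.foldl (fun (st : PySem.Dict Int Int × Int) x =>
        let s := st.2 + (if x > B then 1 else -1)
        (st.1.insert s (st.1.getD s 0 + 1), s)) (d0, s0)
      = ((pvPbal B s0 L).foldl (fun d x => d.insert x (d.getD x 0 + 1)) d0,
         (pvPbal B s0 L).getLastD s0) := by
  induction L generalizing s0 d0 with
  | nil => simp [pvPbal]
  | cons x xs ih => simp only [List.foldl_cons, pvPbal, ih, List.getLastD_cons]

lemma pvSumFold (B : Int) (bc : PySem.Dict Int Int) (L : List Int) (s0 r0 : Int) :
    L.foldl (fun (st : Int × Int) x =>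
        let s := st.2 + (if x > B then 1 else -1)
        (st.1 + bc.getD (-s) 0, s)) (r0, s0)
      = (r0 + ((pvPbal B s0 L).map (fun t => bc.getD (-t) 0)).sum,
         (pvPbal B s0 L).getLastD s0) := by
  induction L generalizing s0 r0 with
  | nil => simp [pvPbal]
  | cons x xs ih =>
    simp only [List.foldl_cons, pvPbal, ih, List.getLastD_cons, List.map_cons, List.sum_cons]
    rw [add_assoc]

-- the common value: for each left prefix balance t (empty prefix included), the number of
-- right prefix balances equal to -t (empty prefix included)
def pvCnt (B : Int) (R L : List Int) : Int :=
  ((0 :: pvPbal B 0 L).map (fun t => (((0 :: pvPbal B 0 R).count (-t) : Nat) : Int))).sum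

lemma pvA_eval (n B : Int) (A : List Int) (p : Nat)
    (hidx : PySem.List.index? A B = some p) (hp : p < A.length) (hn : n ≤ (A.length : Int)) :
    count_subsequences_with_median_B n B A
      = pvCnt B ((A.drop (p+1)).take (n.toNat - (p+1))) ((A.take p).reverse) := by
  have hr : PySem.List.pyRange ((p : Int) + 1) n 1
      = PySem.List.pyRange (((p + 1 : Nat)) : Int) (((n.toNat : Nat)) : Int) 1 := by
    by_cases h0 : 0 ≤ n
    · congr 1; omega
    · rw [PySem.List.pyRange_one_eq_nil (by omega), PySem.List.pyRange_one_eq_nil (by omega)]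
  have hfold1 : (PySem.List.pyRange (((p + 1 : Nat)) : Int) (((n.toNat : Nat)) : Int) 1).foldl
      (fun (st : PySem.Dict Int Int × Int) i =>
        let s := st.2 + (if PySem.List.pyGetD A i 0 > B then 1 else -1)
        (st.1.insert s (st.1.getD s 0 + 1), s)) (PySem.Dict.empty.insert 0 1, 0)
      = ((pvPbal B 0 ((A.drop (p+1)).take (n.toNat - (p+1)))).foldl
           (fun d x => d.insert x (d.getD x 0 + 1)) (PySem.Dict.empty.insert 0 1),
         (pvPbal B 0 ((A.drop (p+1)).take (n.toNat - (p+1)))).getLastD 0) := by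
    calc _ = ((PySem.List.pyRange (((p + 1 : Nat)) : Int) (((n.toNat : Nat)) : Int) 1).map
          (fun i => PySem.List.pyGetD A i 0)).foldl
          (fun (st : PySem.Dict Int Int × Int) x =>
            let s := st.2 + (if x > B then 1 else -1)
            (st.1.insert s (st.1.getD s 0 + 1), s)) (PySem.Dict.empty.insert 0 1, 0) :=
        (List.foldl_map).symm
      _ = _ := by rw [pvMapRight A (p+1) n.toNat (by omega), pvDictFold]
  have hbc : ∀ t : Int, ((pvPbal B 0 ((A.drop (p+1)).take (n.toNat - (p+1)))).foldl
        (fun d x => d.insert x (d.getD x 0 + 1)) (PySem.Dict.empty.insert 0 1)).getD t 0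
      = ((((0 :: pvPbal B 0 ((A.drop (p+1)).take (n.toNat - (p+1)))).count t : Nat)) : Int) := by
    intro t
    rw [PySem.Dict.getD_foldl_insert_add_one, PySem.Dict.getD_insert, PySem.Dict.getD_empty,
        List.count_cons]
    rcases eq_or_ne t 0 with h1 | h1
    · simp [h1]; ring
    · simp [h1]; exact fun h => h1 h.symm
  have hfold2 : ∀ r0 : Int, (PySem.List.pyRange ((p : Int) - 1) (-1) (-1)).foldl
      (fun (st : Int × Int) i =>
        let s := st.2 + (if PySem.List.pyGetD A i 0 > B then 1 else -1)
        (st.1 + ((pvPbal B 0 ((A.drop (p+1)).take (n.toNat - (p+1)))).foldl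
           (fun d x => d.insert x (d.getD x 0 + 1)) (PySem.Dict.empty.insert 0 1)).getD (-s) 0, s))
      (r0, 0)
      = (r0 + ((pvPbal B 0 ((A.take p).reverse)).map
            (fun t => ((pvPbal B 0 ((A.drop (p+1)).take (n.toNat - (p+1)))).foldl
               (fun d x => d.insert x (d.getD x 0 + 1)) (PySem.Dict.empty.insert 0 1)).getD (-t) 0)).sum,
         (pvPbal B 0 ((A.take p).reverse)).getLastD 0) := by
    intro r0
    calc _ = ((PySem.List.pyRange ((p : Int) - 1) (-1) (-1)).map
          (fun i => PySem.List.pyGetD A i 0)).foldl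
          (fun (st : Int × Int) x =>
            let s := st.2 + (if x > B then 1 else -1)
            (st.1 + ((pvPbal B 0 ((A.drop (p+1)).take (n.toNat - (p+1)))).foldl
               (fun d x => d.insert x (d.getD x 0 + 1)) (PySem.Dict.empty.insert 0 1)).getD (-s) 0, s))
          (r0, 0) := (List.foldl_map).symm
      _ = _ := by rw [pvMapLeft A p (by omega), pvSumFold]
  unfold count_subsequences_with_median_B
  simp only [hidx, Option.getD_some, hr, hfold1, hfold2]
  simp only [hbc]
  unfold pvCnt
  simp only [List.map_cons, List.sum_cons, neg_zero]

-- ===== B-side lemmas =====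

lemma pvPbal_shift (B a s : Int) (L : List Int) :
    pvPbal B (a + s) L = (pvPbal B s L).map (fun x => a + x) := by
  induction L generalizing s with
  | nil => simp [pvPbal]
  | cons x xs ih =>
    simp only [pvPbal, List.map_cons]
    rw [add_assoc, ih]

lemma pvCountShift (t : Int) (l : List Int) :
    (l.map (fun x => t + x)).count 0 = l.count (-t) := by
  simp only [List.count_eq_countP, List.countP_map]
  apply List.countP_congr
  intro x _
  simp only [Function.comp_apply, beq_iff_eq]
  omega

lemma pvCntFold (B : Int) (L : List Int) (s0 r0 : Int) :
    L.foldl (fun (st2 : Int × Int) x =>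
        (if st2.2 + (if x > B then 1 else -1) = 0 then st2.1 + 1 else st2.1,
         st2.2 + (if x > B then 1 else -1))) (r0, s0)
      = (r0 + (((pvPbal B s0 L).count 0 : Nat) : Int), (pvPbal B s0 L).getLastD s0) := by
  induction L generalizing s0 r0 with
  | nil => simp [pvPbal]
  | cons x xs ih =>
    simp only [List.foldl_cons, pvPbal, ih, List.getLastD_cons, List.count_cons]
    rw [Prod.mk.injEq]
    refine ⟨?_, rfl⟩
    by_cases h : s0 + (if x > B then 1 else -1) = 0
    · simp [h]; ring
    · simp [h]

lemma pvSumFoldG (B : Int) (g : Int → Int) (L : List Int) (s0 r0 : Int) :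
    L.foldl (fun (st : Int × Int) x =>
        (st.1 + g (st.2 + (if x > B then 1 else -1)), st.2 + (if x > B then 1 else -1))) (r0, s0)
      = (r0 + ((pvPbal B s0 L).map g).sum, (pvPbal B s0 L).getLastD s0) := by
  induction L generalizing s0 r0 with
  | nil => simp [pvPbal]
  | cons x xs ih =>
    simp only [List.foldl_cons, pvPbal, ih, List.getLastD_cons, List.map_cons, List.sum_cons]
    rw [add_assoc]

-- number of right prefix balances (empty included) equal to -t
def pvGcnt (B : Int) (R : List Int) (t : Int) : Int := (((0 :: pvPbal B 0 R).count (-t) : Nat) : Int)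

-- the outer step of B's port, as a named function (definitionally the port's lambda)
def pvF (n B : Int) (A : List Int) (p : Nat) (st : Int × Int) (l : Int) : Int × Int :=
  (((PySem.List.pyRange (((p : Nat) : Int) + 1) n 1).foldl
      (fun (st2 : Int × Int) r =>
        (if st2.2 + (if PySem.List.pyGetD A r 0 > B then 1 else -1) = 0 then st2.1 + 1 else st2.1,
         st2.2 + (if PySem.List.pyGetD A r 0 > B then 1 else -1)))
      (if (if l ≠ ((p : Nat) : Int) then st.2 + (if PySem.List.pyGetD A l 0 > B then 1 else -1) else st.2) = 0
         then st.1 + 1 else st.1,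
       if l ≠ ((p : Nat) : Int) then st.2 + (if PySem.List.pyGetD A l 0 > B then 1 else -1) else st.2)).1,
   if l ≠ ((p : Nat) : Int) then st.2 + (if PySem.List.pyGetD A l 0 > B then 1 else -1) else st.2)

-- the outer step with the inner loop evaluated away
def pvG (B : Int) (A R : List Int) (st : Int × Int) (l : Int) : Int × Int :=
  (st.1 + pvGcnt B R (st.2 + (if PySem.List.pyGetD A l 0 > B then 1 else -1)),
   st.2 + (if PySem.List.pyGetD A l 0 > B then 1 else -1))

lemma pvB_eval (n B : Int) (A : List Int) (p : Nat)
    (hidx : PySem.List.index? A B = some p) (hp : p < A.length) (hn : n ≤ (A.length : Int)) :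
    count_subsequences_with_median_B_alt n B A
      = pvCnt B ((A.drop (p+1)).take (n.toNat - (p+1))) ((A.take p).reverse) := by
  set R := (A.drop (p+1)).take (n.toNat - (p+1)) with hR
  have hr : PySem.List.pyRange ((p : Int) + 1) n 1
      = PySem.List.pyRange (((p + 1 : Nat)) : Int) (((n.toNat : Nat)) : Int) 1 := by
    by_cases h0 : 0 ≤ n
    · congr 1; omega
    · rw [PySem.List.pyRange_one_eq_nil (by omega), PySem.List.pyRange_one_eq_nil (by omega)]
  -- the inner loop, evaluated: count of zero balances along the right side
  have hinner : ∀ r0 t : Int, (PySem.List.pyRange ((p : Int) + 1) n 1).foldl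
      (fun (st2 : Int × Int) r =>
        (if st2.2 + (if PySem.List.pyGetD A r 0 > B then 1 else -1) = 0 then st2.1 + 1 else st2.1,
         st2.2 + (if PySem.List.pyGetD A r 0 > B then 1 else -1))) (r0, t)
      = (r0 + (((pvPbal B t R).count 0 : Nat) : Int), (pvPbal B t R).getLastD t) := by
    intro r0 t
    have e1 := (List.foldl_map
        (f := fun i => PySem.List.pyGetD A i 0)
        (g := fun (st2 : Int × Int) x =>
          (if st2.2 + (if x > B then 1 else -1) = 0 then st2.1 + 1 else st2.1,
           st2.2 + (if x > B then 1 else -1)))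
        (l := PySem.List.pyRange (((p + 1 : Nat)) : Int) (((n.toNat : Nat)) : Int) 1)
        (init := ((r0, t) : Int × Int))).symm
    rw [pvMapRight A (p+1) n.toNat (by omega), ← hR, pvCntFold] at e1
    rw [hr]
    exact e1
  -- the per-left-balance contribution
  have hg : ∀ t : Int, (if t = 0 then (1 : Int) else 0) + (((pvPbal B t R).count 0 : Nat) : Int)
      = pvGcnt B R t := by
    intro t
    have hsh : pvPbal B t R = (pvPbal B 0 R).map (fun x => t + x) := by
      simpa using pvPbal_shift B t 0 R
    unfold pvGcnt
    rw [hsh, pvCountShift, List.count_cons]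
    by_cases h1 : t = 0
    · simp [h1]; ring
    · have h2 : ¬ ((0 : Int) == -t) = true := by simpa using fun hh => h1 (by omega)
      simp [h1, h2]
  -- first iteration (l = pos)
  have hF0 : pvF n B A p (0, 0) ((p : Nat) : Int) = (pvGcnt B R 0, 0) := by
    unfold pvF
    rw [if_neg (by simp : ¬ (((p : Nat) : Int) ≠ ((p : Nat) : Int)))]
    norm_num
    rw [hinner]
    have h0 := hg 0
    rw [if_pos rfl] at h0
    simpa using h0
  -- remaining iterations: the guard always fires, the inner loop becomes pvGcnt
  have hFG : ∀ (acc : Int × Int) (x : Int), x ∈ PySem.List.pyRange ((p : Int) - 1) (-1) (-1) →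
      pvF n B A p acc x = pvG B A R acc x := by
    intro acc x hx
    have hxp : x ≠ ((p : Nat) : Int) := by
      have := (PySem.List.mem_pyRange_neg_one).mp hx
      omega
    unfold pvF pvG
    rw [if_pos hxp, hinner]
    rw [Prod.mk.injEq]
    refine ⟨?_, rfl⟩
    rw [← hg (acc.2 + (if PySem.List.pyGetD A x 0 > B then 1 else -1))]
    by_cases h : acc.2 + (if PySem.List.pyGetD A x 0 > B then 1 else -1) = 0
    · simp [h]; ring
    · simp [h]
  -- the whole outer loop
  have hmain : ((PySem.List.pyRange (((p : Nat) : Int)) (-1) (-1)).foldl (pvF n B A p) (0, 0)).1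
      = pvCnt B R ((A.take p).reverse) := by
    have e2 := (List.foldl_map
        (f := fun i => PySem.List.pyGetD A i 0)
        (g := fun (st : Int × Int) x =>
          (st.1 + pvGcnt B R (st.2 + (if x > B then 1 else -1)), st.2 + (if x > B then 1 else -1)))
        (l := PySem.List.pyRange ((p : Int) - 1) (-1) (-1))
        (init := ((pvGcnt B R 0, 0) : Int × Int))).symm
    rw [pvMapLeft A p (by omega), pvSumFoldG B (pvGcnt B R)] at e2
    rw [PySem.List.pyRange_neg_one_cons (by omega : (-1 : Int) < ((p : Nat) : Int)), List.foldl_cons,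
        hF0, PySem.List.foldl_congr_mem _ _ _ _ hFG]
    refine (congrArg Prod.fst e2).trans ?_
    have hfun : pvGcnt B R = fun t => (((0 :: pvPbal B 0 R).count (-t) : Nat) : Int) := rfl
    unfold pvCnt
    rw [hfun]
    simp
  unfold count_subsequences_with_median_B_alt
  simp only [hidx, Option.getD_some]
  exact hmain

-- ===== VERDICT =====
theorem count_subsequences_with_median_B_spec : Claim_equal_count_subsequences_with_median_B := by
  intro n B A _ hpre
  obtain ⟨hB, hn⟩ := hpre
  unfold Spec_count_subsequences_with_median_B
  rcases h : PySem.List.index? A B with _ | p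
  · exfalso
    have : B ∉ A := by
      have := h
      simp only [PySem.List.index?] at this
      exact List.idxOf?_eq_none_iff.mp this
    exact this hB
  · have hp : p < A.length := by
      have := h
      simp only [PySem.List.index?] at this
      obtain ⟨hlt, -, -⟩ := List.idxOf?_eq_some_iff.mp this
      exact hlt
    rw [pvA_eval n B A p h hp hn, pvB_eval n B A p h hp hn]
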